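-- pv_equiv track=rewrite | github.com/sweeneyde/thompson_knots | link_classification.py | is_irreducible
-- ===== SOURCE A (Python) =====
-- def is_irreducible(pair):
--     word1, word2 = pair
--
--     def indices_of_carats(word):
--         return {word.count("o", 0, i)
--                 for i in range(len(word))
--                 if word[i:i + 4] == "(oo)"}
--
--     set1 = indices_of_carats(word1)
--     set2 = indices_of_carats(word2)
--     return set1.isdisjoint(set2)
-- ===== SOURCE B (Python) =====
-- def is_irreducible(pair):
--     def indices_of_carats(word):
--         s = set()
--         count = 0  # running number of 'o' seen so far
--         for i, ch in enumerate(word):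
--             if word.startswith("(oo)", i):
--                 s.add(count)
--             if ch == "o":
--                 count += 1
--         return s
--
--     word1, word2 = pair
--     return indices_of_carats(word1).isdisjoint(indices_of_carats(word2))
-- ===== Notes on version B (the rewrite author's own statement) =====
-- stated objective: alternative
-- what changed: replaces the per-carat word.count('o',0,i) re-scan over a range(len(word)) set comprehension by a single explicit pass that keeps a running prefix count of 'o' while scanning for '(oo)' occurrences
import Mathlib
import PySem

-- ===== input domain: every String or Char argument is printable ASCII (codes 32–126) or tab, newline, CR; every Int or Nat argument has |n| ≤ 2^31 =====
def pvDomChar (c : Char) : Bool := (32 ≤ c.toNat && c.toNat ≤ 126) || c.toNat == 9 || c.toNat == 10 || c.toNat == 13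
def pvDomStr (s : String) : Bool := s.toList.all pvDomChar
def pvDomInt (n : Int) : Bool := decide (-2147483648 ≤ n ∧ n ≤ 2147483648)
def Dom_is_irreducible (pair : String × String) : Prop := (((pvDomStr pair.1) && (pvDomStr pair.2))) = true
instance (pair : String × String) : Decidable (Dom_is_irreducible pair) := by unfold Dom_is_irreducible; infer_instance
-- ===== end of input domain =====

-- B replaces A's per-carat re-count of 'o' by a single pass with a running prefix count (objective: alternative).
-- ===== PORT A =====
-- set comprehension over range(len(word)): filter positions where word[i:i+4] == "(oo)", value word.count("o", 0, i)
def pvCaratsA (word : String) : PySem.Set Int :=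
  PySem.Set.ofList
    (((PySem.List.pyRange 0 (PySem.Str.len word) 1).filter
        (fun i => PySem.Str.slice word (some i) (some (i + 4)) == "(oo)")).map
      (fun i => ((PySem.Str.count (PySem.Str.slice word (some 0) (some i)) "o" : Nat) : Int)))

def is_irreducible (pair : String × String) : Bool :=
  PySem.Set.isdisjoint (pvCaratsA pair.1) (pvCaratsA pair.2)

-- ===== PORT B =====
def pvPat : List Char := ['(', 'o', 'o', ')']

-- one pass over the characters: c is the running count of 'o' seen so far, s the set built so far
def pvCaratsB : List Char → Int → PySem.Set Int → PySem.Set Int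
  | [], _, s => s
  | ch :: rest, c, s =>
    pvCaratsB rest (c + (if ch = 'o' then 1 else 0))
      (if PySem.Chars.startswith (ch :: rest) pvPat then PySem.Set.add s c else s)

def is_irreducible_alt (pair : String × String) : Bool :=
  PySem.Set.isdisjoint (pvCaratsB pair.1.toList 0 PySem.Set.empty)
    (pvCaratsB pair.2.toList 0 PySem.Set.empty)

-- ===== PRECONDITION & SPEC =====
def Spec_is_irreducible (pair : String × String) (out : Bool) : Prop := out = is_irreducible_alt pair
instance (pair : String × String) (out : Bool) : Decidable (Spec_is_irreducible pair out) := by unfold Spec_is_irreducible; infer_instance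

-- ===== CLAIM (what is proved, stated in full; the proofs are below) =====
def Claim_equal_is_irreducible : Prop := ∀ (pair : String × String), Dom_is_irreducible pair → Spec_is_irreducible pair (is_irreducible pair)

-- ===== LEMMAS AND PROOFS =====

-- the list of prefix-counts at carat positions, in scan order (shared characterisation of both ports)
def pvVals : List Char → Int → List Int
  | [], _ => []
  | ch :: rest, c =>
    (if PySem.Chars.startswith (ch :: rest) pvPat then [c] else []) ++
      pvVals rest (c + (if ch = 'o' then 1 else 0))

theorem pvCaratsB_eq (l : List Char) : ∀ (c : Int) (s : PySem.Set Int),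
    pvCaratsB l c s = (pvVals l c).foldl PySem.Set.add s := by
  induction l with
  | nil => intro c s; simp [pvCaratsB, pvVals]
  | cons ch rest ih =>
    intro c s
    by_cases h : PySem.Chars.startswith (ch :: rest) pvPat <;>
      simp [pvCaratsB, pvVals, h, ih]

theorem pvCount_go_singleton (c : Char) : ∀ (fuel : Nat) (l : List Char) (acc : Nat),
    l.length ≤ fuel → PySem.Chars.count.go [c] fuel l acc = acc + l.count c := by
  intro fuel
  induction fuel with
  | zero => intro l acc h; cases l with
    | nil => simp [PySem.Chars.count.go]
    | cons x t => simp at h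
  | succ n ih =>
    intro l acc h
    cases l with
    | nil => simp [PySem.Chars.count.go]
    | cons x t =>
      simp only [List.length_cons, Nat.add_le_add_iff_right] at h
      by_cases hx : x = c
      · subst hx
        have hpre : [x].isPrefixOf (x :: t) = true := by simp [List.isPrefixOf]
        simp [PySem.Chars.count.go, hpre, ih t (acc + 1) h]
        omega
      · have hpre : [c].isPrefixOf (x :: t) = false := by
          simp [List.isPrefixOf]; exact fun h' => hx h'.symm
        simp [PySem.Chars.count.go, hpre, ih t acc h, hx]

theorem pvCount_singleton (l : List Char) (c : Char) :
    PySem.Chars.count l [c] = l.count c := by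
  simp [PySem.Chars.count, pvCount_go_singleton c l.length l 0 le_rfl]

theorem pvTake_eq_pat_iff (l : List Char) :
    (l.take 4 = pvPat) ↔ PySem.Chars.startswith l pvPat = true := by
  rw [PySem.Chars.startswith_iff, List.prefix_iff_eq_take]
  constructor <;> intro h <;> simpa [pvPat] using h.symm

theorem pvMain (l : List Char) : ∀ (c : Int),
    ((List.range l.length).filter (fun k => decide ((l.drop k).take 4 = pvPat))).map
      (fun k => c + (((l.take k).count 'o' : Nat) : Int)) = pvVals l c := by
  induction l with
  | nil => intro c; simp [pvVals]
  | cons ch rest ih =>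
    intro c
    rw [List.length_cons, List.range_succ_eq_map]
    simp only [List.filter_cons, List.filter_map, List.drop_zero]
    have hstep : List.map ((fun k => c + (((ch :: rest).take k).count 'o' : Int)) ∘ Nat.succ)
        ((List.range rest.length).filter
          ((fun k => decide (((ch :: rest).drop k).take 4 = pvPat)) ∘ Nat.succ)) =
        pvVals rest (c + (if ch = 'o' then 1 else 0)) := by
      rw [← ih (c + (if ch = 'o' then 1 else 0))]
      apply List.map_congr_left
      intro k _
      simp [List.take_succ_cons, List.count_cons]
      by_cases hc : ch = 'o' <;> simp [hc] <;> try ring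
    by_cases h0 : PySem.Chars.startswith (ch :: rest) pvPat
    · have h0' : (ch :: rest).take 4 = pvPat := (pvTake_eq_pat_iff _).mpr h0
      rw [pvVals]
      simp only [h0', decide_true, List.map_cons, h0, if_true, List.singleton_append,
        List.map_map]
      exact List.cons_eq_cons.mpr ⟨by simp, hstep⟩
    · have h0' : ¬ (ch :: rest).take 4 = pvPat := fun h' => h0 ((pvTake_eq_pat_iff _).mp h')
      rw [pvVals]
      simp only [h0', decide_false, Bool.false_eq_true, if_false, h0, List.nil_append,
        List.map_map]
      exact hstep

theorem pvPred_eq (w : String) (k : Nat) :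
    (PySem.Str.slice w (some ((k : Int))) (some ((k : Int) + 4)) == "(oo)") =
      decide ((w.toList.drop k).take 4 = pvPat) := by
  have h4 : ((k : Int) + 4) = ((k : Int) + ((4 : Nat) : Int)) := by norm_num
  apply Bool.eq_iff_iff.mpr
  rw [beq_iff_eq, decide_eq_true_iff, ← String.toList_inj, PySem.Str.toList_slice,
    PySem.Chars.slice_eq_listSlice, h4, PySem.List.slice_natCast_add]
  rfl

theorem pvVal_eq (w : String) (k : Nat) :
    PySem.Str.count (PySem.Str.slice w (some (0 : Int)) (some (k : Int))) "o" =
      (w.toList.take k).count 'o' := by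
  rw [PySem.Str.count_eq, PySem.Str.toList_slice, PySem.Chars.slice_eq_listSlice,
    PySem.List.slice_zero_start, PySem.List.slice_to_natCast]
  exact pvCount_singleton _ 'o'

theorem pvCarats_eq (word : String) :
    pvCaratsA word = pvCaratsB word.toList 0 PySem.Set.empty := by
  rw [pvCaratsB_eq, ← pvMain word.toList 0, pvCaratsA, PySem.Set.ofList_eq_foldl]
  have hempty : PySem.Set.empty = ([] : List Int) := rfl
  rw [hempty]
  congr 1
  rw [PySem.Str.len_eq, PySem.List.pyRange_one]
  simp only [sub_zero, Int.toNat_natCast, List.filter_map, List.map_map]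
  rw [List.filter_congr (fun k _ => by
    simp only [Function.comp_def, zero_add]
    exact pvPred_eq word k)]
  apply List.map_congr_left
  intro k _
  simp only [Function.comp_def, zero_add]
  rw [pvVal_eq word k]

-- ===== VERDICT (by name: the statement is the Claim_ definition above) =====
theorem is_irreducible_spec : Claim_equal_is_irreducible := by
  intro pair _
  unfold Spec_is_irreducible is_irreducible is_irreducible_alt
  rw [pvCarats_eq, pvCarats_eq]
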